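-- pv_equiv track=rewrite | github.com/msteckle/sentinel-py | src/sentinel_py/s2/cdse_s2_nodes.py | choose_best_resolution
-- ===== SOURCE A (Python) =====
-- from typing import Iterable, Sequence
-- from collections.abc import Iterable
--
-- def choose_best_resolution(
--     target_res: int,
--     available_resolutions: Iterable[int],
-- ) -> int | None:
--     """
--     Choose the best available resolution (in meters) given a target resolution.
--
--     Rules:
--     - If `target_res` is available, return it.
--     - Otherwise, choose the largest resolution <= target_res (finer-but-not-coarser).
--     - If no resolution <= target_res exists, fall back to the finest available
--       (smallest number).
--     """
--     avail = sorted(set(int(r) for r in available_resolutions))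
--     if not avail:
--         return None
--
--     if target_res in avail:
--         return target_res
--
--     # resolutions finer or equal to target (numerically <=)
--     finer_or_equal = [r for r in avail if r <= target_res]
--     if finer_or_equal:
--         return max(finer_or_equal)
--
--     # all are coarser than requested; pick the finest available
--     return min(avail)
-- ===== SOURCE B (Python) =====
-- def choose_best_resolution(target_res, available_resolutions):
--     best_le = None   # largest value <= target_res seen so far
--     finest = None    # smallest value seen so far
--     for r in available_resolutions:
--         v = int(r)
--         if v <= target_res and (best_le is None or v > best_le):
--             best_le = v
--         if finest is None or v < finest:
--             finest = v
--     return best_le if best_le is not None else finest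
-- ===== Notes on version B (the rewrite author's own statement) =====
-- stated objective: faster
-- what changed: Replaces sort+dedup+membership test+two list scans with a single pass that maintains the largest value <= target and the global minimum.
import Mathlib
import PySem

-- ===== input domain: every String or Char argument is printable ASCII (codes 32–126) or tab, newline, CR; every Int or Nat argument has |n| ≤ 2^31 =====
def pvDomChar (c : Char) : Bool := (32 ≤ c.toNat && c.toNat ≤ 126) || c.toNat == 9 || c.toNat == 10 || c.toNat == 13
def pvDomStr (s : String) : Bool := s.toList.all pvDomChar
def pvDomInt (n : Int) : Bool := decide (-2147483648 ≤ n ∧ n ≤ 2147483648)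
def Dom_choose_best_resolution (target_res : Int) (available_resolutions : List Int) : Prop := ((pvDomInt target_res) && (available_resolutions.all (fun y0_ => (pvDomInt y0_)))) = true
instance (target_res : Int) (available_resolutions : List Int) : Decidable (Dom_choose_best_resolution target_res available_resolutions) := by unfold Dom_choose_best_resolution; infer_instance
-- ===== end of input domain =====

-- B replaces A's sort+dedup and two list scans by one pass keeping the best value ≤ target and the overall minimum (objective: faster, O(n) vs O(n log n)).

-- ===== PORT A =====
def choose_best_resolution (target_res : Int) (available_resolutions : List Int) : Option Int :=
  -- avail = sorted(set(int(r) for r in available_resolutions))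
  let avail := PySem.List.sorted (PySem.Set.ofList available_resolutions) (fun x => x) false
  if avail = [] then none
  else if target_res ∈ avail then some target_res
  else
    let finer_or_equal := avail.filter (fun r => decide (r ≤ target_res))
    if finer_or_equal ≠ [] then PySem.List.max? finer_or_equal (fun x => x)
    else PySem.List.min? avail (fun x => x)

-- ===== PORT B =====
-- one step of B's loop body, acting on the pair (best_le, finest)
def cbrStep (target_res : Int) (acc : Option Int × Option Int) (v : Int) : Option Int × Option Int :=
  ( (match acc.1 with
     | none => if v ≤ target_res then some v else none
     | some b => if v ≤ target_res ∧ b < v then some v else some b),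
    (match acc.2 with | none => some v | some m => if v < m then some v else some m) )

def choose_best_resolution_alt (target_res : Int) (available_resolutions : List Int) : Option Int :=
  let p := available_resolutions.foldl (cbrStep target_res) (none, none)
  match p.1 with
  | some b => some b
  | none => p.2

-- ===== PRECONDITION & SPEC =====
def Spec_choose_best_resolution (target_res : Int) (available_resolutions : List Int) (out : Option Int) : Prop := out = choose_best_resolution_alt target_res available_resolutions
instance (target_res : Int) (available_resolutions : List Int) (out : Option Int) : Decidable (Spec_choose_best_resolution target_res available_resolutions out) := by unfold Spec_choose_best_resolution; infer_instance

-- ===== CLAIM (what is proved, stated in full; the proofs are below) =====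
def Claim_equal_choose_best_resolution : Prop := ∀ (target_res : Int) (available_resolutions : List Int), Dom_choose_best_resolution target_res available_resolutions → Spec_choose_best_resolution target_res available_resolutions (choose_best_resolution target_res available_resolutions)

-- ===== LEMMAS AND PROOFS =====

-- first component of B's fold, in isolation
def cbrB (t : Int) (acc : Option Int) (v : Int) : Option Int :=
  match acc with
  | none => if v ≤ t then some v else none
  | some b => if v ≤ t ∧ b < v then some v else some b

-- second component of B's fold, in isolation
def cbrM (acc : Option Int) (v : Int) : Option Int :=
  match acc with | none => some v | some m => if v < m then some v else some m

lemma cbr_fold_split (t : Int) (xs : List Int) (b m : Option Int) :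
    xs.foldl (cbrStep t) (b, m) = (xs.foldl (cbrB t) b, xs.foldl (cbrM) m) := by
  induction xs generalizing b m with
  | nil => rfl
  | cons v xs ih =>
      simp only [List.foldl_cons]
      rw [ih]
      rfl

-- starting from `some b`, the best_le fold returns the max of b and the elements ≤ t
lemma cbrB_some (t : Int) (xs : List Int) (b : Int) :
    ∃ c, xs.foldl (cbrB t) (some b) = some c ∧ (c = b ∨ (c ∈ xs ∧ c ≤ t)) ∧ b ≤ c ∧
      ∀ v ∈ xs, v ≤ t → v ≤ c := by
  induction xs generalizing b with
  | nil => exact ⟨b, rfl, Or.inl rfl, le_refl b, by simp⟩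
  | cons v xs ih =>
      simp only [List.foldl_cons, cbrB]
      by_cases h : v ≤ t ∧ b < v
      · simp only [if_pos h]
        obtain ⟨c, hc, hmem, hle, hmax⟩ := ih v
        refine ⟨c, hc, ?_, ?_, ?_⟩
        · rcases hmem with h1 | ⟨h1, h2⟩
          · exact Or.inr ⟨by simp [h1], h1 ▸ h.1⟩
          · exact Or.inr ⟨by simp [h1], h2⟩
        · exact le_of_lt (lt_of_lt_of_le h.2 hle)
        · intro u hu hut
          rcases List.mem_cons.mp hu with rfl | hu
          · exact hle
          · exact hmax u hu hut
      · simp only [if_neg h]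
        obtain ⟨c, hc, hmem, hle, hmax⟩ := ih b
        refine ⟨c, hc, ?_, hle, ?_⟩
        · rcases hmem with h1 | ⟨h1, h2⟩
          · exact Or.inl h1
          · exact Or.inr ⟨by simp [h1], h2⟩
        · intro u hu hut
          rcases List.mem_cons.mp hu with rfl | hu
          · have : ¬ b < u := fun hb => h ⟨hut, hb⟩
            exact le_trans (le_of_not_gt this) hle
          · exact hmax u hu hut

-- characterization of the best_le fold from `none`
lemma cbrB_char (t : Int) (xs : List Int) :
    (xs.foldl (cbrB t) none = none ∧ ∀ v ∈ xs, ¬ v ≤ t) ∨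
    (∃ c, xs.foldl (cbrB t) none = some c ∧ c ∈ xs ∧ c ≤ t ∧ ∀ v ∈ xs, v ≤ t → v ≤ c) := by
  induction xs with
  | nil => exact Or.inl ⟨rfl, by simp⟩
  | cons v xs ih =>
      simp only [List.foldl_cons, cbrB]
      by_cases h : v ≤ t
      · simp only [if_pos h]
        obtain ⟨c, hc, hmem, hle, hmax⟩ := cbrB_some t xs v
        refine Or.inr ⟨c, hc, ?_, ?_, ?_⟩
        · rcases hmem with h1 | ⟨h1, _⟩
          · simp [h1]
          · simp [h1]
        · rcases hmem with h1 | ⟨_, h2⟩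
          · exact h1 ▸ h
          · exact h2
        · intro u hu hut
          rcases List.mem_cons.mp hu with rfl | hu
          · exact hle
          · exact hmax u hu hut
      · simp only [if_neg h]
        rcases ih with ⟨hn, hall⟩ | ⟨c, hc, hmem, hct, hmax⟩
        · refine Or.inl ⟨hn, ?_⟩
          intro u hu
          rcases List.mem_cons.mp hu with rfl | hu
          · exact h
          · exact hall u hu
        · refine Or.inr ⟨c, hc, by simp [hmem], hct, ?_⟩
          intro u hu hut
          rcases List.mem_cons.mp hu with rfl | hu
          · exact absurd hut h
          · exact hmax u hu hut

-- starting from `some m`, the min fold returns the min of m and the elements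
lemma cbrM_some (xs : List Int) (m : Int) :
    ∃ c, xs.foldl cbrM (some m) = some c ∧ (c = m ∨ c ∈ xs) ∧ c ≤ m ∧ ∀ v ∈ xs, c ≤ v := by
  induction xs generalizing m with
  | nil => exact ⟨m, rfl, Or.inl rfl, le_refl m, by simp⟩
  | cons v xs ih =>
      simp only [List.foldl_cons, cbrM]
      by_cases h : v < m
      · simp only [if_pos h]
        obtain ⟨c, hc, hmem, hle, hmin⟩ := ih v
        refine ⟨c, hc, ?_, le_trans hle (le_of_lt h), ?_⟩
        · rcases hmem with h1 | h1
          · exact Or.inr (by simp [h1])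
          · exact Or.inr (by simp [h1])
        · intro u hu
          rcases List.mem_cons.mp hu with rfl | hu
          · exact hle
          · exact hmin u hu
      · simp only [if_neg h]
        obtain ⟨c, hc, hmem, hle, hmin⟩ := ih m
        refine ⟨c, hc, ?_, hle, ?_⟩
        · rcases hmem with h1 | h1
          · exact Or.inl h1
          · exact Or.inr (by simp [h1])
        · intro u hu
          rcases List.mem_cons.mp hu with rfl | hu
          · exact le_trans hle (le_of_not_gt h)
          · exact hmin u hu

-- characterization of the min fold from `none`
lemma cbrM_char (xs : List Int) :
    (xs = [] ∧ xs.foldl cbrM none = none) ∨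
    (∃ m, xs.foldl cbrM none = some m ∧ m ∈ xs ∧ ∀ v ∈ xs, m ≤ v) := by
  cases xs with
  | nil => exact Or.inl ⟨rfl, rfl⟩
  | cons v xs =>
      simp only [List.foldl_cons, cbrM]
      obtain ⟨c, hc, hmem, hle, hmin⟩ := cbrM_some xs v
      refine Or.inr ⟨c, hc, ?_, ?_⟩
      · rcases hmem with h1 | h1
        · simp [h1]
        · simp [h1]
      · intro u hu
        rcases List.mem_cons.mp hu with rfl | hu
        · exact hle
        · exact hmin u hu

-- membership in sorted(set(xs)) is membership in xs
lemma mem_avail (xs : List Int) (a : Int) :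
    a ∈ PySem.List.sorted (PySem.Set.ofList xs) (fun x => x) false ↔ a ∈ xs := by
  rw [PySem.List.mem_sorted, PySem.Set.mem_ofList]

-- ===== VERDICT (by name: the statement is the Claim_ definition above) =====
theorem choose_best_resolution_spec : Claim_equal_choose_best_resolution := by
  intro t xs _
  unfold Spec_choose_best_resolution choose_best_resolution choose_best_resolution_alt
  rw [cbr_fold_split]
  simp only []
  by_cases hnil : PySem.List.sorted (PySem.Set.ofList xs) (fun x => x) false = []
  · have hxs : xs = [] := by
      cases xs with
      | nil => rfl
      | cons v vs =>
        have hv : v ∈ PySem.List.sorted (PySem.Set.ofList (v :: vs)) (fun x => x) false :=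
          (mem_avail _ v).mpr (by simp)
        rw [hnil] at hv
        exact absurd hv (by simp)
    subst hxs
    rw [if_pos hnil]
    rfl
  · have hxsne : xs ≠ [] := by
      intro h; subst h; exact hnil rfl
    simp only [if_neg hnil]
    by_cases hin : t ∈ PySem.List.sorted (PySem.Set.ofList xs) (fun x => x) false
    · -- target available: A returns t; B's best_le is exactly t
      have htx : t ∈ xs := (mem_avail xs t).mp hin
      rcases cbrB_char t xs with ⟨_, hall⟩ | ⟨c, hc, hcx, hct, hmax⟩
      · exact absurd (le_refl t) (hall t htx)
      · have : c = t := le_antisymm hct (hmax t htx (le_refl t))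
        simp [hin, hc, this]
    · simp only [if_neg hin]
      by_cases hfe : (PySem.List.sorted (PySem.Set.ofList xs) (fun x => x) false).filter
          (fun r => decide (r ≤ t)) ≠ []
      · -- some element ≤ t exists: both return the max of those
        simp only [if_pos hfe]
        obtain ⟨M, hM⟩ : ∃ M, PySem.List.max?
            ((PySem.List.sorted (PySem.Set.ofList xs) (fun x => x) false).filter
              (fun r => decide (r ≤ t))) (fun x => x) = some M :=
          Option.ne_none_iff_exists'.mp
            (fun h => hfe ((PySem.List.max?_eq_none_iff _ _).mp h))
        have hMfe := PySem.List.max?_mem hM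
        have hMx : M ∈ xs := (mem_avail xs M).mp (List.mem_of_mem_filter hMfe)
        have hMt : M ≤ t := by simpa using List.of_mem_filter hMfe
        have hMmax := PySem.List.max?_isMax hM
        rcases cbrB_char t xs with ⟨_, hall⟩ | ⟨c, hc, hcx, hct, hmax⟩
        · exact absurd hMt (hall M hMx)
        · have h1 : c ≤ M := hMmax c (List.mem_filter.mpr ⟨(mem_avail xs c).mpr hcx, by simpa using hct⟩)
          have h2 : M ≤ c := hmax M hMx hMt
          rw [hM, hc, le_antisymm h1 h2]
      · -- no element ≤ t: both return the minimum
        simp only [if_neg hfe]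
        push Not at hfe
        have hnone : ∀ v ∈ xs, ¬ v ≤ t := by
          intro v hv hvt
          have : v ∈ (PySem.List.sorted (PySem.Set.ofList xs) (fun x => x) false).filter
              (fun r => decide (r ≤ t)) := List.mem_filter.mpr ⟨(mem_avail xs v).mpr hv, by simpa using hvt⟩
          simp [hfe] at this
        obtain ⟨m, hm⟩ : ∃ m, PySem.List.min?
            (PySem.List.sorted (PySem.Set.ofList xs) (fun x => x) false) (fun x => x) = some m :=
          Option.ne_none_iff_exists'.mp
            (fun h => hnil ((PySem.List.min?_eq_none_iff _ _).mp h))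
        have hmx : m ∈ xs := (mem_avail xs m).mp (PySem.List.min?_mem hm)
        have hmmin := PySem.List.min?_isMin hm
        rcases cbrB_char t xs with ⟨hbn, _⟩ | ⟨c, _, hcx, hct, _⟩
        · rcases cbrM_char xs with ⟨h1, _⟩ | ⟨m', hm', hm'x, hm'min⟩
          · exact absurd h1 hxsne
          · have h1 : m ≤ m' := hmmin m' ((mem_avail xs m').mpr hm'x)
            have h2 : m' ≤ m := hm'min m hmx
            rw [hm, hbn, hm', le_antisymm h2 h1]
        · exact absurd hct (hnone c hcx)
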